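-- pv_equiv track=rewrite | github.com/karimullahchowdhury12/AttendanceLog-Parser | process_attendance.py | search_summary_by_date_range
-- ===== SOURCE A (Python) =====
-- from typing import Dict, List, Tuple
--
-- def search_summary_by_date_range(summary: Dict, emp_code: str, start_date: str, end_date: str) -> List[Dict]:
--     results = []
--     for date in sorted(summary.keys()):
--         if start_date <= date <= end_date:
--             for record in summary[date]:
--                 if record['emp_code'] == emp_code:
--                     results.append({
--                         'date': date,
--                         **record
--                     })
--     return results
-- ===== SOURCE B (Python) =====
-- def search_summary_by_date_range(summary, emp_code, start_date, end_date):
--     # Build an index keyed by employee code over all records, then answer the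
--     # query from the emp_code bucket: range-filter it and stable-sort by date.
--     index = {}
--     for date, records in summary.items():
--         for record in records:
--             index.setdefault(record.get('emp_code'), []).append((date, record))
--     hits = [t for t in index.get(emp_code, []) if start_date <= t[0] <= end_date]
--     hits.sort(key=lambda t: t[0])
--     return [{'date': d, **r} for d, r in hits]
-- ===== Notes on version B (the rewrite author's own statement) =====
-- stated objective: alternative
-- what changed: A walks the pre-sorted date keys and scans every record of each in-range date for the matching emp_code; B builds a hash index keyed by record.get('emp_code') over all records in one pass, answers the query from the single emp_code bucket (so the per-record code comparison disappears into a dict lookup), range-filters that bucket and stable-sorts it by date at the end.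
import Mathlib
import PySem

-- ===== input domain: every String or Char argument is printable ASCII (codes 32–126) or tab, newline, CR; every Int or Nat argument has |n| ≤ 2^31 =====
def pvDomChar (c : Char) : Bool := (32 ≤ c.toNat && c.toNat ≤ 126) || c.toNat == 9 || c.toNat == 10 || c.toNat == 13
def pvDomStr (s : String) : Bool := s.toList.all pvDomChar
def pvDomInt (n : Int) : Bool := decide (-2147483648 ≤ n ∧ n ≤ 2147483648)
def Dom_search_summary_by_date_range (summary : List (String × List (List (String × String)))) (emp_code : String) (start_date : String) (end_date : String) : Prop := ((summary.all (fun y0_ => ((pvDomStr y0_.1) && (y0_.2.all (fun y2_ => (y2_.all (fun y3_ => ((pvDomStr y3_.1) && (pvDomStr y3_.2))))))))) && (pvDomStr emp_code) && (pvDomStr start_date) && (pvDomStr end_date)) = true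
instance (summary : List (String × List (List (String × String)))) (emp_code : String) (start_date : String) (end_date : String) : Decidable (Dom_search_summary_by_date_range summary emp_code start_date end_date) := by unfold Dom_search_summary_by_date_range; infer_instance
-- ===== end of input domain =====

-- B answers the query from a hash index keyed by emp_code (built in one pass) instead of
-- scanning every record of every in-range date; same return value, an alternative algorithm.

-- ===== PORT A =====
-- Python's s <= t on str, as a Bool on code-point lists (exact: s <= t iff not t < s).
def pvLe (s t : String) : Bool := !(PySem.Chars.strLt t.toList s.toList)

-- {'date': date, **record} as an insertion-ordered dict, returned as its item list.
def pvMerge (date : String) (record : List (String × String)) : List (String × String) :=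
  (record.foldl (fun d kv => d.insert kv.1 kv.2)
    (PySem.Dict.insert PySem.Dict.empty "date" date)).items

-- A: iterate sorted(summary.keys()); for each in-range date look its records up and filter by emp_code.
def search_summary_by_date_range (summary : List (String × List (List (String × String)))) (emp_code : String) (start_date : String) (end_date : String) : List (List (String × String)) :=
  (PySem.List.sorted (summary.map Prod.fst) (fun k => k.toList) false).foldl
    (fun results date =>
      if pvLe start_date date && pvLe date end_date then
        ((List.lookup date summary).getD []).foldl
          (fun results record =>
            if ((List.lookup "emp_code" record).getD "") == emp_code then
              results ++ [pvMerge date record]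
            else results) results
      else results) []

-- ===== PORT B =====
-- B: index.setdefault(record.get('emp_code'), []).append((date, record)) over all records
-- (ported as modify: value at the key becomes old ++ [(date, record)], key keeps its position);
-- then the emp_code bucket is range-filtered, stable-sorted by date, and merged.
def search_summary_by_date_range_alt (summary : List (String × List (List (String × String)))) (emp_code : String) (start_date : String) (end_date : String) : List (List (String × String)) :=
  let index : PySem.Dict (Option String) (List (String × List (String × String))) :=
    summary.foldl
      (fun idx p =>
        p.2.foldl
          (fun idx record =>
            idx.modify (List.lookup "emp_code" record) [] (· ++ [(p.1, record)])) idx)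
      PySem.Dict.empty
  let hits := (index.getD (some emp_code) []).filter
    (fun t => pvLe start_date t.1 && pvLe t.1 end_date)
  (PySem.List.sorted hits (fun t => t.1.toList) false).map (fun t => pvMerge t.1 t.2)

-- ===== PRECONDITION & SPEC =====
-- Pre_ excludes (i) association lists with duplicate keys, which no Python dict produces (A's keys()/lookup
-- behaviour on them is not a dict's), and (ii) inputs where some record of an in-range date lacks 'emp_code',
-- on which A raises KeyError.
def Pre_search_summary_by_date_range (summary : List (String × List (List (String × String)))) (emp_code : String) (start_date : String) (end_date : String) : Prop :=
  (summary.map Prod.fst).Nodup ∧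
  ∀ p ∈ summary, (pvLe start_date p.1 && pvLe p.1 end_date) → ∀ r ∈ p.2, (List.lookup "emp_code" r).isSome
instance (summary : List (String × List (List (String × String)))) (emp_code : String) (start_date : String) (end_date : String) : Decidable (Pre_search_summary_by_date_range summary emp_code start_date end_date) := by unfold Pre_search_summary_by_date_range; infer_instance
def pvWitness_search_summary_by_date_range : (List (String × List (List (String × String)))) × String × String × String :=
  ([("2024-01-02", [[("emp_code", "E1"), ("name", "Bo")]]), ("2024-01-01", [[("emp_code", "E2")]])], "E1", "2024-01-01", "2024-01-31")

def Spec_search_summary_by_date_range (summary : List (String × List (List (String × String)))) (emp_code : String) (start_date : String) (end_date : String) (out : List (List (String × String))) : Prop := out = search_summary_by_date_range_alt summary emp_code start_date end_date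
instance (summary : List (String × List (List (String × String)))) (emp_code : String) (start_date : String) (end_date : String) (out : List (List (String × String))) : Decidable (Spec_search_summary_by_date_range summary emp_code start_date end_date out) := by unfold Spec_search_summary_by_date_range; infer_instance

-- ===== CLAIM (what is proved, stated in full; the proofs are below) =====
def Claim_equal_search_summary_by_date_range : Prop := ∀ (summary : List (String × List (List (String × String)))) (emp_code : String) (start_date : String) (end_date : String), Dom_search_summary_by_date_range summary emp_code start_date end_date → Pre_search_summary_by_date_range summary emp_code start_date end_date → Spec_search_summary_by_date_range summary emp_code start_date end_date (search_summary_by_date_range summary emp_code start_date end_date)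

-- ===== LEMMAS AND PROOFS =====

-- Proof-side views of the two programs ------------------------------------------------------

-- B's membership test for the emp_code bucket.
def pvTest (emp_code : String) (r : List (String × String)) : Bool :=
  List.lookup "emp_code" r == some emp_code

-- the tagged block of (date, record) matches contributed by one (date, records) pair
def pvG (emp_code start_date end_date : String) (p : String × List (List (String × String))) :
    List (String × List (String × String)) :=
  if pvLe start_date p.1 && pvLe p.1 end_date then
    (p.2.filter (pvTest emp_code)).map (fun r => (p.1, r))
  else []

def pvH (summary : List (String × List (List (String × String)))) (emp_code start_date end_date : String)
    (d : String) : List (String × List (String × String)) :=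
  pvG emp_code start_date end_date (d, (List.lookup d summary).getD [])

theorem pv_mem_of_lookup {ν : Type} (l : List (String × ν)) (k : String) (v : ν)
    (h : List.lookup k l = some v) : (k, v) ∈ l := by
  induction l with
  | nil => simp [List.lookup] at h
  | cons p t ih =>
    simp only [List.lookup] at h
    by_cases he : (k == p.1) = true
    · simp only [he] at h
      cases p with
      | mk a b =>
        simp only [beq_iff_eq] at he
        injection h with h
        subst he h
        exact List.mem_cons_self
    · simp only [Bool.not_eq_true] at he
      simp only [he] at h
      right; exact ih h

theorem pv_filter_insertBy {α κ : Type} [LinearOrder κ] [DecidableEq κ] (key : α → κ) (k : κ) (x : α)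
    (acc : List α) (h : acc.Pairwise (fun a b => key a ≤ key b)) :
    (PySem.List.insertBy (fun a b => decide (key a < key b)) x acc).filter (fun a => decide (key a = k)) =
      if key x = k then acc.filter (fun a => decide (key a = k)) ++ [x]
      else acc.filter (fun a => decide (key a = k)) := by
  induction acc with
  | nil => simp only [PySem.List.insertBy, List.filter_nil]; split <;> simp_all
  | cons y ys ih =>
    rw [List.pairwise_cons] at h
    simp only [PySem.List.insertBy]
    by_cases hlt : key x < key y
    · simp only [hlt, decide_true, if_true]
      have hnil : (y :: ys).filter (fun a => decide (key a = k)) = [] ∨ ¬ key x = k := by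
        by_cases hk : key x = k
        · left
          apply List.filter_eq_nil_iff.mpr
          intro a ha
          have hya : key y ≤ key a := by
            rcases List.mem_cons.mp ha with h1 | h2
            · exact le_of_eq (by rw [h1])
            · exact h.1 a h2
          simp only [decide_eq_true_eq]
          intro hak
          rw [hak, ← hk] at hya
          exact absurd (lt_of_lt_of_le hlt hya) (lt_irrefl _)
        · right; exact hk
      rcases hnil with hnil | hk
      · have hk' : key x = k ∨ ¬ key x = k := em _
        rcases hk' with hk | hk
        · rw [List.filter_cons, if_pos (by simp [hk]), hnil, if_pos hk]; simp
        · rw [List.filter_cons, if_neg (by simp [hk]), if_neg hk]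
      · rw [if_neg hk, List.filter_cons, if_neg (by simp [hk])]
    · simp only [hlt, decide_false, Bool.false_eq_true, if_false]
      rw [List.filter_cons, List.filter_cons, ih h.2]
      by_cases hk : key x = k <;> by_cases hyk : key y = k <;>
        simp [hk, hyk]

theorem pv_filter_sorted {α κ : Type} [LinearOrder κ] [DecidableEq κ] (key : α → κ) (k : κ) (xs : List α) :
    (PySem.List.sorted xs key false).filter (fun a => decide (key a = k)) =
      xs.filter (fun a => decide (key a = k)) := by
  induction xs using List.reverseRecOn with
  | nil => simp [PySem.List.sorted]
  | append_singleton xs x ih =>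
    rw [PySem.List.sorted_eq_foldl_insertBy] at ih ⊢
    rw [List.foldl_append, List.foldl_cons, List.foldl_nil]
    rw [pv_filter_insertBy key k x _ (by
      have := PySem.List.sorted_pairwise (κ := κ) xs key
      rwa [PySem.List.sorted_eq_foldl_insertBy] at this)]
    rw [List.filter_append, List.filter_cons, List.filter_nil, ih]
    by_cases hk : key x = k <;> simp [hk]

theorem pv_sorted_unique {α κ : Type} [LinearOrder κ] [DecidableEq κ] (key : α → κ) :
    ∀ (L M : List α), L.Pairwise (fun a b => key a ≤ key b) → M.Pairwise (fun a b => key a ≤ key b) →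
    (∀ k : κ, L.filter (fun a => decide (key a = k)) = M.filter (fun a => decide (key a = k))) →
    L = M := by
  intro L
  induction L with
  | nil =>
    intro M _ _ hf
    cases M with
    | nil => rfl
    | cons b bs =>
      exfalso
      have := hf (key b)
      simp at this
  | cons a L' ih =>
    intro M hL hM hf
    cases M with
    | nil =>
      exfalso
      have := hf (key a)
      simp at this
    | cons b bs =>
      rw [List.pairwise_cons] at hL hM
      have haM : a ∈ b :: bs := by
        have := hf (key a)
        have ha : a ∈ (b :: bs).filter (fun x => decide (key x = key a)) := by
          rw [← this]; simp
        exact List.mem_of_mem_filter ha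
      have hbL : b ∈ a :: L' := by
        have := hf (key b)
        have hb : b ∈ (a :: L').filter (fun x => decide (key x = key b)) := by
          rw [this]; simp
        exact List.mem_of_mem_filter hb
      have hba : key b ≤ key a := by
        rcases List.mem_cons.mp haM with h1 | h2
        · exact le_of_eq (by rw [h1])
        · exact hM.1 a h2
      have hab : key a ≤ key b := by
        rcases List.mem_cons.mp hbL with h1 | h2
        · exact le_of_eq (by rw [h1])
        · exact hL.1 b h2
      have hkey : key a = key b := le_antisymm hab hba
      have hhead := hf (key a)
      rw [List.filter_cons, List.filter_cons, if_pos (by simp), if_pos (by simp [hkey])] at hhead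
      have hab' : a = b := by exact (List.cons.injEq _ _ _ _ ▸ hhead).1
      subst hab'
      have htail : ∀ k : κ, L'.filter (fun x => decide (key x = k)) = bs.filter (fun x => decide (key x = k)) := by
        intro k
        by_cases hk : key a = k
        · have := hf k
          rw [List.filter_cons, List.filter_cons, if_pos (by simp [hk]), if_pos (by simp [hk])] at this
          exact (List.cons.injEq _ _ _ _ ▸ this).2
        · have := hf k
          rwa [List.filter_cons, List.filter_cons, if_neg (by simp [hk]), if_neg (by simp [hk])] at this
      rw [ih bs hL.2 hM.2 htail]

theorem pv_stable_sorted_eq {α κ : Type} [LinearOrder κ] [DecidableEq κ] (key : α → κ) (xs L : List α)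
    (hsort : L.Pairwise (fun a b => key a ≤ key b))
    (hstable : ∀ k : κ, L.filter (fun a => decide (key a = k)) = xs.filter (fun a => decide (key a = k))) :
    PySem.List.sorted xs key false = L := by
  apply pv_sorted_unique key
  · exact PySem.List.sorted_pairwise xs key
  · exact hsort
  · intro k; rw [pv_filter_sorted, hstable]

theorem pv_filter_flatMap {γ R : Type} (f : γ → List (String × R)) (tag : γ → String)
    (h : ∀ x, ∀ r ∈ f x, r.1 = tag x) (k : List Char) (l : List γ) :
    (l.flatMap f).filter (fun r => decide (r.1.toList = k)) =
      (l.filter (fun x => decide ((tag x).toList = k))).flatMap f := by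
  induction l with
  | nil => simp
  | cons x l ih =>
    rw [List.flatMap_cons, List.filter_append, ih, List.filter_cons]
    by_cases hk : (tag x).toList = k
    · rw [if_pos (by simp [hk]), List.flatMap_cons]
      congr 1
      apply List.filter_eq_self.mpr
      intro r hr
      simp [h x r hr, hk]
    · rw [if_neg (by simp [hk])]
      have : (f x).filter (fun r => decide (r.1.toList = k)) = [] := by
        apply List.filter_eq_nil_iff.mpr
        intro r hr
        simp [h x r hr, hk]
      rw [this, List.nil_append]

theorem pv_pairwise_flatMap {γ R : Type} (f : γ → List (String × R)) (tag : γ → String)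
    (h : ∀ x, ∀ r ∈ f x, r.1 = tag x) (l : List γ)
    (hl : l.Pairwise (fun a b => (tag a).toList ≤ (tag b).toList)) :
    (l.flatMap f).Pairwise (fun a b => a.1.toList ≤ b.1.toList) := by
  induction l with
  | nil => simp
  | cons x l ih =>
    rw [List.pairwise_cons] at hl
    rw [List.flatMap_cons, List.pairwise_append]
    refine ⟨?_, ih hl.2, ?_⟩
    · exact List.pairwise_of_forall_mem_list
        (fun a ha b hb => by rw [h x a ha, h x b hb])
    · intro a ha b hb
      rw [List.mem_flatMap] at hb
      obtain ⟨y, hy, hby⟩ := hb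
      rw [h x a ha, h y b hby]
      exact hl.1 y hy

theorem pv_lookup_filter {R : Type} (l : List (String × R)) (hnd : (l.map Prod.fst).Nodup)
    (k : String) (hk : k ∈ l.map Prod.fst) :
    ∃ recs, List.lookup k l = some recs ∧ l.filter (fun p => decide (p.1 = k)) = [(k, recs)] := by
  induction l with
  | nil => simp at hk
  | cons p l ih =>
    rw [List.map_cons, List.nodup_cons] at hnd
    by_cases hp : p.1 = k
    · refine ⟨p.2, ?_, ?_⟩
      · simp [List.lookup, hp.symm]
      · rw [List.filter_cons, if_pos (by simp [hp])]
        have : l.filter (fun q => decide (q.1 = k)) = [] := by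
          apply List.filter_eq_nil_iff.mpr
          intro q hq
          simp only [decide_eq_true_eq]
          intro hqk
          exact hnd.1 (hp ▸ hqk ▸ List.mem_map_of_mem hq)
        rw [this]
        have : p = (k, p.2) := by rw [← hp]
        rw [← this]
    · have hk' : k ∈ l.map Prod.fst := by
        rcases List.mem_cons.mp hk with h1 | h2
        · exact absurd h1.symm hp
        · exact h2
      obtain ⟨recs, h1, h2⟩ := ih hnd.2 hk'
      refine ⟨recs, ?_, ?_⟩
      · simp only [List.lookup]
        rw [show (k == p.1) = false by
          simp only [beq_eq_false_iff_ne, ne_eq]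
          exact fun h => hp h.symm]
        exact h1
      · rw [List.filter_cons, if_neg (by simp [hp]), h2]

theorem pv_sorted_instEq {α : Type} (xs : List α) (key : α → List Char) :
    PySem.List.sorted xs key false =
      @PySem.List.sorted α (List Char) List.instLinearOrder.toLT LinearOrder.toDecidableLT xs key false := by
  rw [PySem.List.sorted_eq_foldl_insertBy,
      @PySem.List.sorted_eq_foldl_insertBy α (List Char) List.instLinearOrder.toLT LinearOrder.toDecidableLT xs key]
  have : (fun (a b : α) => @decide (key a < key b) (List.decidableLT _ _)) =
      (fun (a b : α) => @decide (key a < key b) (@LinearOrder.toDecidableLT _ List.instLinearOrder _ _)) := by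
    funext a b
    exact decide_eq_decide.mpr Iff.rfl
  rw [this]

theorem pv_sorted_pairwise' {α : Type} (xs : List α) (key : α → List Char) :
    (PySem.List.sorted xs key false).Pairwise (fun a b => key a ≤ key b) := by
  have h := PySem.List.sorted_pairwise xs key
  rwa [← pv_sorted_instEq] at h

theorem pv_mem_pvG (e s t : String) (p : String × List (List (String × String)))
    (r : String × List (String × String)) (hr : r ∈ pvG e s t p) : r.1 = p.1 := by
  unfold pvG at hr
  split at hr
  · obtain ⟨x, _, hx⟩ := List.mem_map.mp hr
    rw [← hx]
  · simp at hr

-- stable sort of the unordered match list = the per-date blocks in sorted key order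
theorem pv_main (summary : List (String × List (List (String × String)))) (e s t : String)
    (hnd : (summary.map Prod.fst).Nodup) :
    PySem.List.sorted (summary.flatMap (pvG e s t)) (fun r => r.1.toList) false =
      (PySem.List.sorted (summary.map Prod.fst) (fun k => k.toList) false).flatMap (pvH summary e s t) := by
  have hH : ∀ d, ∀ r ∈ pvH summary e s t d, r.1 = d := by
    intro d r hr
    exact pv_mem_pvG e s t _ r hr
  have h1 : ((PySem.List.sorted (summary.map Prod.fst) (fun k => k.toList) false).flatMap
      (pvH summary e s t)).Pairwise (fun a b => a.1.toList ≤ b.1.toList) :=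
    pv_pairwise_flatMap (pvH summary e s t) (fun d => d) hH _
      (pv_sorted_pairwise' (summary.map Prod.fst) (fun k => k.toList))
  have h2 : ∀ k : List Char,
      ((PySem.List.sorted (summary.map Prod.fst) (fun k => k.toList) false).flatMap
        (pvH summary e s t)).filter (fun a => decide (a.1.toList = k)) =
      (summary.flatMap (pvG e s t)).filter (fun a => decide (a.1.toList = k)) := by
    intro k
    rw [pv_filter_flatMap (pvH summary e s t) (fun d => d) hH k,
        pv_filter_flatMap (pvG e s t) Prod.fst (fun p r hr => pv_mem_pvG e s t p r hr) k]
    by_cases hex : ∃ p ∈ summary, p.1.toList = k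
    · obtain ⟨p0, hp0, hk0⟩ := hex
      have hmem : p0.1 ∈ summary.map Prod.fst := List.mem_map_of_mem hp0
      have e1 : (PySem.List.sorted (summary.map Prod.fst) (fun k => k.toList) false).filter
            (fun d => decide (d.toList = k)) =
          (PySem.List.sorted (summary.map Prod.fst) (fun k => k.toList) false).filter
            (fun d => decide (d = p0.1)) := by
        apply List.filter_congr
        intro d _
        simp only [decide_eq_decide]
        rw [← hk0]
        exact ⟨fun h => String.toList_inj.mp h, fun h => by rw [h]⟩
      have e2 : (summary.filter (fun p => decide (p.1.toList = k))) =
          summary.filter (fun p => decide (p.1 = p0.1)) := by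
        apply List.filter_congr
        intro p _
        simp only [decide_eq_decide]
        rw [← hk0]
        exact ⟨fun h => String.toList_inj.mp h, fun h => by rw [h]⟩
      obtain ⟨recs, hlk, hfl⟩ := pv_lookup_filter summary hnd p0.1 hmem
      have hcount : ((PySem.List.sorted (summary.map Prod.fst) (fun k => k.toList) false).count p0.1) = 1 := by
        rw [(PySem.List.sorted_perm (summary.map Prod.fst) (fun k => k.toList) false).count_eq]
        exact List.count_eq_one_of_mem hnd hmem
      rw [e1, e2, List.filter_eq, hcount, hfl]
      simp only [List.replicate_one, List.flatMap_cons, List.flatMap_nil, List.append_nil]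
      unfold pvH
      rw [hlk]
      rfl
    · push Not at hex
      have l1 : (PySem.List.sorted (summary.map Prod.fst) (fun k => k.toList) false).filter
          (fun d => decide (d.toList = k)) = [] := by
        apply List.filter_eq_nil_iff.mpr
        intro d hd
        have : d ∈ summary.map Prod.fst := (PySem.List.mem_sorted _ _ _ _).mp hd
        obtain ⟨p, hp, hpd⟩ := List.mem_map.mp this
        simp only [decide_eq_true_eq]
        exact fun hk => hex p hp (by rw [hpd]; exact hk)
      have l2 : summary.filter (fun p => decide (p.1.toList = k)) = [] := by
        apply List.filter_eq_nil_iff.mpr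
        intro q hq
        simp only [decide_eq_true_eq]
        exact hex q hq
      rw [l1, l2]
      rfl
  rw [pv_sorted_instEq]
  exact pv_stable_sorted_eq (fun (r : String × List (String × String)) => r.1.toList) _ _ h1 h2

-- A = the per-date blocks in sorted key order, merged (Pre_ turns A's KeyError-prone test into pvTest)
theorem pv_Ashape (summary : List (String × List (List (String × String)))) (e s t : String)
    (hpre : ∀ p ∈ summary, (pvLe s p.1 && pvLe p.1 t) = true → ∀ r ∈ p.2, (List.lookup "emp_code" r).isSome) :
    search_summary_by_date_range summary e s t =
      ((PySem.List.sorted (summary.map Prod.fst) (fun k => k.toList) false).flatMap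
        (pvH summary e s t)).map (fun r => pvMerge r.1 r.2) := by
  unfold search_summary_by_date_range
  rw [PySem.List.foldl_congr_mem _ _
      (fun results date => results ++ (pvH summary e s t date).map (fun r => pvMerge r.1 r.2)) _
      (by
        intro acc d _
        by_cases hr : (pvLe s d && pvLe d t) = true
        · rw [if_pos hr]
          have hbody : ((List.lookup d summary).getD []).foldl
              (fun results record =>
                if ((List.lookup "emp_code" record).getD "") == e then results ++ [pvMerge d record]
                else results) acc =
              ((List.lookup d summary).getD []).foldl
                (fun results record => if pvTest e record then results ++ [pvMerge d record] else results) acc := by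
            apply PySem.List.foldl_congr_mem
            intro ms r hrmem
            cases hlk : List.lookup d summary with
            | none => rw [hlk] at hrmem; simp at hrmem
            | some recs =>
              rw [hlk] at hrmem
              have hp : (d, recs) ∈ summary := pv_mem_of_lookup summary d recs hlk
              have hs := hpre (d, recs) hp hr r hrmem
              cases hlk2 : List.lookup "emp_code" r with
              | none => rw [hlk2] at hs; simp at hs
              | some v => simp [pvTest, hlk2]
          rw [hbody, PySem.List.foldl_append_if (pvTest e) (fun r => pvMerge d r)]
          simp only [pvH, pvG, hr, if_pos, List.map_map]
          rfl
        · rw [if_neg hr]; simp [pvH, pvG, hr])]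
  rw [PySem.List.foldl_append_eq_flatMap (fun d => (pvH summary e s t d).map (fun r => pvMerge r.1 r.2))]
  rw [List.map_flatMap, List.nil_append]

-- B = stable sort of the unordered match list, merged (no Pre_ needed)
theorem pv_fold (summary : List (String × List (List (String × String)))) :
    summary.foldl
        (fun (idx : PySem.Dict (Option String) (List (String × List (String × String)))) p =>
          p.2.foldl
            (fun idx record =>
              idx.modify (List.lookup "emp_code" record) [] (· ++ [(p.1, record)])) idx)
        PySem.Dict.empty =
      ((summary.flatMap (fun p => p.2.map (fun r => (p.1, r)))).map
          (fun t => (List.lookup "emp_code" t.2, t))).foldl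
        (fun (d : PySem.Dict (Option String) (List (String × List (String × String)))) q =>
          d.modify q.1 [] (· ++ [q.2])) PySem.Dict.empty := by
  rw [List.foldl_map, List.foldl_flatMap]
  congr 1
  funext idx p
  rw [List.foldl_map]

theorem pv_bucket_getD (e : String) (L : List (String × List (String × String))) :
    (((L.map (fun t => (List.lookup "emp_code" t.2, t))).foldl
        (fun (d : PySem.Dict (Option String) (List (String × List (String × String)))) q =>
          d.modify q.1 [] (· ++ [q.2])) PySem.Dict.empty)).getD (some e) [] =
      L.filter (fun t => pvTest e t.2) := by
  rw [PySem.Dict.getD_foldl_modify_append, PySem.Dict.getD_empty, List.nil_append,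
      List.filter_map, List.map_map]
  have h1 : ((fun (q : Option String × (String × List (String × String))) => q.2) ∘
      fun t => (List.lookup "emp_code" t.2, t)) = id := rfl
  have h2 : ((fun (q : Option String × (String × List (String × String))) => q.1 == some e) ∘
      fun (t : String × List (String × String)) => (List.lookup "emp_code" t.2, t)) =
      (fun t => pvTest e t.2) := rfl
  rw [h1, h2, List.map_id]

theorem pv_hits (e s t : String) (l : List (String × List (List (String × String)))) :
    ((l.flatMap (fun p => p.2.map (fun r => (p.1, r)))).filter
        (fun (q : String × List (String × String)) => pvTest e q.2)).filter
      (fun q => pvLe s q.1 && pvLe q.1 t) = l.flatMap (pvG e s t) := by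
  induction l with
  | nil => simp
  | cons p l ih =>
    rw [List.flatMap_cons, List.filter_append, List.filter_append, ih, List.flatMap_cons]
    congr 1
    rw [List.filter_map]
    have h1 : ((fun (q : String × List (String × String)) => pvTest e q.2) ∘
        fun r => (p.1, r)) = pvTest e := rfl
    rw [h1, List.filter_map]
    have h2 : ((fun (q : String × List (String × String)) => pvLe s q.1 && pvLe q.1 t) ∘
        fun r => (p.1, r)) = (fun _ => pvLe s p.1 && pvLe p.1 t) := rfl
    rw [h2]
    unfold pvG
    by_cases hr : (pvLe s p.1 && pvLe p.1 t) = true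
    · rw [if_pos hr]
      congr 1
      exact List.filter_eq_self.mpr (fun r _ => hr)
    · rw [if_neg hr]
      rw [List.filter_eq_nil_iff.mpr (fun r _ => by simpa using hr), List.map_nil]

theorem pv_Bshape (summary : List (String × List (List (String × String)))) (e s t : String) :
    search_summary_by_date_range_alt summary e s t =
      (PySem.List.sorted (summary.flatMap (pvG e s t)) (fun r => r.1.toList) false).map
        (fun r => pvMerge r.1 r.2) := by
  show (PySem.List.sorted
      (((summary.foldl
          (fun (idx : PySem.Dict (Option String) (List (String × List (String × String)))) p =>
            p.2.foldl
              (fun idx record =>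
                idx.modify (List.lookup "emp_code" record) [] (· ++ [(p.1, record)])) idx)
          PySem.Dict.empty).getD (some e) []).filter
        (fun t_1 => pvLe s t_1.1 && pvLe t_1.1 t))
      (fun t => t.1.toList) false).map (fun t => pvMerge t.1 t.2) = _
  rw [pv_fold, pv_bucket_getD, pv_hits]

-- ===== VERDICT (by name: the statement is the Claim_ definition above) =====
theorem search_summary_by_date_range_spec : Claim_equal_search_summary_by_date_range := by
  intro summary e s t _ hpre
  unfold Spec_search_summary_by_date_range
  rw [pv_Ashape summary e s t hpre.2, pv_Bshape, pv_main summary e s t hpre.1]
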